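-- pv_equiv track=rewrite | github.com/parchoc/BallScroll | mousePos.py | codeToPoints
-- ===== SOURCE A (Python) =====
-- pointsList = [
--     (0, 0),
--     (1, 0),
--     (1, 1),
--     (0, 1),
--     (-1, 1),
--     (-1, 0),
--     (-1, -1),
--     (0, -1),
--     (1, -1)
--
-- ]
--
-- def codeToPoints(codes_list):
--     points = [(0, 0)]
--     min_x = 0
--     min_y = 0
--     for code in codes_list:
--         points.append((points[-1][0] + pointsList[code][0], points[-1][1] + pointsList[code][1]))
--         if points[-1][0] < min_x:
--             min_x = points[-1][0]
--         if points[-1][1] < min_y: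
--             min_y = points[-1][1]
--
--     if (min_x < 0) or (min_y < 0):
--         for i in range(len(points)):
--             points[i] = (points[i][0] + abs(min_x), points[i][1] + abs(min_y))
--
--     return points
-- ===== SOURCE B (Python) =====
-- pointsList = [
--     (0, 0),
--     (1, 0),
--     (1, 1),
--     (0, 1),
--     (-1, 1),
--     (-1, 0),
--     (-1, -1),
--     (0, -1),
--     (1, -1)
-- ]
--
-- def codeToPoints(codes_list):
--     # Walk the codes BACKWARDS, building the path relative to its ENDPOINT
--     # (the last point is (0,0), each predecessor is successor minus its delta).
--     # Because the final answer is translated by the minimum coordinates anyway,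
--     # the absolute origin is irrelevant: shifting the relative path by its own
--     # minima yields exactly the normalized path.
--     rev = [(0, 0)]
--     for c in reversed(codes_list):
--         dx, dy = pointsList[c]
--         lx, ly = rev[-1]
--         rev.append((lx - dx, ly - dy))
--     rev.reverse()
--     mx = min(p[0] for p in rev)
--     my = min(p[1] for p in rev)
--     return [(px - mx, py - my) for px, py in rev]
-- ===== Notes on version B (the rewrite author's own statement) =====
-- stated objective: alternative
-- what changed: B traverses the codes in reverse, building the path relative to its ENDPOINT (each predecessor = successor minus its delta), then reverses the list and shifts it by the minima of the relative coordinates; the absolute origin cancels in the normalization, which is the correctness argument, whereas A builds the absolute path forward with fused min tracking and a conditional shift.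
import Mathlib
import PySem

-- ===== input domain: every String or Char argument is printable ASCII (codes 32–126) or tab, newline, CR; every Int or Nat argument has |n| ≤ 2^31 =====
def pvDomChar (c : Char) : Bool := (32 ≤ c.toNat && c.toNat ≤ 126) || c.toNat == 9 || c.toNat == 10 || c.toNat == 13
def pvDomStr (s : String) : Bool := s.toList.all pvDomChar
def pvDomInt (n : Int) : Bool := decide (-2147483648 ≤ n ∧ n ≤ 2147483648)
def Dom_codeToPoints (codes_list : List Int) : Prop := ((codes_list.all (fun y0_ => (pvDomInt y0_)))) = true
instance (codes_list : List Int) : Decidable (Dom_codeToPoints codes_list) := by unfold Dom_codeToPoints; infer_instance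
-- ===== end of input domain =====

-- B walks the codes backwards, building the path relative to its endpoint, then shifts that
-- relative path by its own minima (the absolute origin cancels out); objective: alternative.


-- ===== PORT A =====
-- module-level constant pointsList
def pvPointsList : List (Int × Int) :=
  [(0, 0), (1, 0), (1, 1), (0, 1), (-1, 1), (-1, 0), (-1, -1), (0, -1), (1, -1)]

-- one iteration of A's for-loop over (points, min_x, min_y); pointsList[code] and points[-1]
-- are Python indexing (pyGet?); the .getD (0,0) defaults are unreachable under Pre_ (points is
-- never empty; Pre_ keeps every code in range), where Python would raise IndexError.
def pvStepA (st : List (Int × Int) × Int × Int) (code : Int) : List (Int × Int) × Int × Int :=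
  let last := (PySem.List.pyGet? st.1 (-1)).getD (0, 0)
  let d := (PySem.List.pyGet? pvPointsList code).getD (0, 0)
  let p : Int × Int := (last.1 + d.1, last.2 + d.2)
  (st.1 ++ [p],
   if p.1 < st.2.1 then p.1 else st.2.1,
   if p.2 < st.2.2 then p.2 else st.2.2)

def codeToPoints (codes_list : List Int) : List (Int × Int) :=
  let st := codes_list.foldl pvStepA ([(0, 0)], 0, 0)
  if st.2.1 < 0 ∨ st.2.2 < 0 then
    st.1.map (fun q => (q.1 + |st.2.1|, q.2 + |st.2.2|))
  else st.1

-- ===== PORT B =====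
-- Source B: pointsList[c], same IndexError domain as A (default unreachable under Pre_)
def pvDelta (c : Int) : Int × Int := (PySem.List.pyGet? pvPointsList c).getD (0, 0)

-- Source B's backward loop body: rev.append((rev[-1][0] - dx, rev[-1][1] - dy))
def pvStepB (acc : List (Int × Int)) (c : Int) : List (Int × Int) :=
  let d := pvDelta c
  let last := (PySem.List.pyGet? acc (-1)).getD (0, 0)
  acc ++ [(last.1 - d.1, last.2 - d.2)]

-- min(p[0] for p in l) / min(p[1] for p in l): fold of min seeded with the first element
def pvMinX : List (Int × Int) → Int
  | [] => 0  -- unreachable: the list always contains (0,0)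
  | p :: rest => rest.foldl (fun m q => min m q.1) p.1

def pvMinY : List (Int × Int) → Int
  | [] => 0  -- unreachable
  | p :: rest => rest.foldl (fun m q => min m q.2) p.2

def codeToPoints_alt (codes_list : List Int) : List (Int × Int) :=
  let rev := codes_list.reverse.foldl pvStepB [(0, 0)]
  let pts := rev.reverse
  let mx := pvMinX pts
  let my := pvMinY pts
  pts.map (fun q => (q.1 - mx, q.2 - my))

-- ===== PRECONDITION & SPEC =====
-- Pre_ excludes exactly the inputs where Python A raises IndexError: pointsList has 9
-- entries, so Python accepts precisely the codes c with -9 <= c < 9.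
def Pre_codeToPoints (codes_list : List Int) : Prop :=
  ∀ c ∈ codes_list, -9 ≤ c ∧ c < 9
instance (codes_list : List Int) : Decidable (Pre_codeToPoints codes_list) := by
  unfold Pre_codeToPoints; infer_instance

def pvWitness_codeToPoints : List Int := [1, 3, -1, 6, 0]

def Spec_codeToPoints (codes_list : List Int) (out : List (Int × Int)) : Prop := out = codeToPoints_alt codes_list
instance (codes_list : List Int) (out : List (Int × Int)) : Decidable (Spec_codeToPoints codes_list out) := by unfold Spec_codeToPoints; infer_instance

-- ===== CLAIM (what is proved, stated in full; the proofs are below) =====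
def Claim_equal_codeToPoints : Prop := ∀ (codes_list : List Int), Dom_codeToPoints codes_list → Pre_codeToPoints codes_list → Spec_codeToPoints codes_list (codeToPoints codes_list)

-- ===== LEMMAS AND PROOFS =====

-- proof-only forward path: the cumulative points of A's loop
def pvAccum (x y : Int) : List (Int × Int) → List (Int × Int)
  | [] => [(x, y)]
  | (dx, dy) :: rest => (x, y) :: pvAccum (x + dx) (y + dy) rest

-- A's fused loop, started after any prefix with current point (x,y), produces exactly
-- the accumulated path appended to the prefix, with the mins folded over the new points.
theorem pvFoldA_eq (cs : List Int) : ∀ (pts : List (Int × Int)) (x y mx my : Int),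
    cs.foldl pvStepA (pts ++ [(x, y)], mx, my) =
      (pts ++ pvAccum x y (cs.map pvDelta),
       ((pvAccum x y (cs.map pvDelta)).tail).foldl (fun m q => if q.1 < m then q.1 else m) mx,
       ((pvAccum x y (cs.map pvDelta)).tail).foldl (fun m q => if q.2 < m then q.2 else m) my) := by
  induction cs with
  | nil => intro pts x y mx my; simp [pvAccum]
  | cons c cs ih =>
    intro pts x y mx my
    have hstep : pvStepA (pts ++ [(x, y)], mx, my) c =
        (pts ++ [(x, y)] ++ [(x + (pvDelta c).1, y + (pvDelta c).2)],
         if x + (pvDelta c).1 < mx then x + (pvDelta c).1 else mx,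
         if y + (pvDelta c).2 < my then y + (pvDelta c).2 else my) := by
      simp [pvStepA, pvDelta, PySem.List.pyGet?_neg_one_append_singleton]
    have hacc : pvAccum x y ((c :: cs).map pvDelta) =
        (x, y) :: pvAccum (x + (pvDelta c).1) (y + (pvDelta c).2) (cs.map pvDelta) := by
      rcases hd : pvDelta c with ⟨dx, dy⟩
      simp [pvAccum, hd]
    rw [List.foldl_cons, hstep, ih (pts ++ [(x, y)]), hacc]
    rcases hd : pvDelta c with ⟨dx, dy⟩
    have hhead : pvAccum (x + dx) (y + dy) (cs.map pvDelta) =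
        (x + dx, y + dy) :: (pvAccum (x + dx) (y + dy) (cs.map pvDelta)).tail := by
      cases hds : cs.map pvDelta with
      | nil => simp [pvAccum]
      | cons d rest => rcases d with ⟨p, q⟩; simp [pvAccum]
    rw [hhead]
    simp

-- shifting the start point shifts every accumulated point
theorem pvAccum_shift (ds : List (Int × Int)) : ∀ (x y a b : Int),
    pvAccum (x + a) (y + b) ds = (pvAccum x y ds).map (fun p => (p.1 + a, p.2 + b)) := by
  induction ds with
  | nil => intro x y a b; simp [pvAccum]
  | cons d rest ih =>
    intro x y a b
    rcases d with ⟨dx, dy⟩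
    have : x + a + dx = x + dx + a := by ring
    rw [pvAccum, pvAccum, List.map_cons, this]
    have : y + b + dy = y + dy + b := by ring
    rw [this, ih]

-- the forward path always starts at its start point
theorem pvAccum_head (ds : List (Int × Int)) (x y : Int) :
    pvAccum x y ds = (x, y) :: (pvAccum x y ds).tail := by
  cases ds with
  | nil => simp [pvAccum]
  | cons d rest => rcases d with ⟨p, q⟩; simp [pvAccum]

-- B's backward build equals the forward path translated by minus the total displacement, reversed
theorem pvRevBuild (cs : List Int) :
    cs.reverse.foldl pvStepB [(0, 0)] =
      ((pvAccum 0 0 (cs.map pvDelta)).map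
        (fun p => (p.1 - ((cs.map pvDelta).map Prod.fst).sum,
                   p.2 - ((cs.map pvDelta).map Prod.snd).sum))).reverse := by
  induction cs with
  | nil => simp [pvAccum]
  | cons c t ih =>
    rcases hd : pvDelta c with ⟨dx, dy⟩
    have hstx : (((c :: t).map pvDelta).map Prod.fst).sum = dx + ((t.map pvDelta).map Prod.fst).sum := by
      simp [hd]
    have hsty : (((c :: t).map pvDelta).map Prod.snd).sum = dy + ((t.map pvDelta).map Prod.snd).sum := by
      simp [hd]
    set Sx := ((t.map pvDelta).map Prod.fst).sum with hSx
    set Sy := ((t.map pvDelta).map Prod.snd).sum with hSy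
    -- left side: fold over t.reverse then one more step with c
    rw [List.reverse_cons, List.foldl_append, List.foldl_cons, List.foldl_nil, ih]
    -- expose the last element of the IH result
    have hsplit : ((pvAccum 0 0 (t.map pvDelta)).map
          (fun p => (p.1 - Sx, p.2 - Sy))).reverse =
        (((pvAccum 0 0 (t.map pvDelta)).tail.map
          (fun p => (p.1 - Sx, p.2 - Sy))).reverse) ++ [((0 : Int) - Sx, (0 : Int) - Sy)] := by
      conv_lhs => rw [pvAccum_head (t.map pvDelta) 0 0]
      simp
    rw [hsplit]
    have hstep : pvStepB ((((pvAccum 0 0 (t.map pvDelta)).tail.map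
          (fun p => (p.1 - Sx, p.2 - Sy))).reverse) ++ [((0 : Int) - Sx, (0 : Int) - Sy)]) c =
        ((((pvAccum 0 0 (t.map pvDelta)).tail.map
          (fun p => (p.1 - Sx, p.2 - Sy))).reverse) ++ [((0 : Int) - Sx, (0 : Int) - Sy)])
          ++ [(0 - Sx - dx, 0 - Sy - dy)] := by
      simp [pvStepB, hd, PySem.List.pyGet?_neg_one_append_singleton]
    rw [hstep]
    -- right side
    have haccc : pvAccum 0 0 ((c :: t).map pvDelta) =
        (0, 0) :: (pvAccum 0 0 (t.map pvDelta)).map (fun p => (p.1 + dx, p.2 + dy)) := by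
      have h0 : (0 : Int) + dx = dx := by ring
      have h0' : (0 : Int) + dy = dy := by ring
      have := pvAccum_shift (t.map pvDelta) 0 0 dx dy
      rw [h0, h0'] at this
      simp [pvAccum, hd, this]
    rw [haccc, hstx, hsty]
    simp only [List.map_cons, List.map_map, List.reverse_cons]
    have hfun : ((fun p : Int × Int => (p.1 - (dx + Sx), p.2 - (dy + Sy))) ∘
          (fun p : Int × Int => (p.1 + dx, p.2 + dy))) =
        (fun p : Int × Int => (p.1 - Sx, p.2 - Sy)) := by
      funext p
      simp only [Function.comp_apply, Prod.mk.injEq]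
      constructor <;> ring
    rw [hfun]
    conv_rhs => rw [pvAccum_head (t.map pvDelta) 0 0]
    simp only [List.map_cons, List.reverse_cons]
    have e1 : (0 : Int) - (dx + Sx) = 0 - Sx - dx := by ring
    have e2 : (0 : Int) - (dy + Sy) = 0 - Sy - dy := by ring
    rw [e1, e2]

-- min-with-if equals min-with-min, as fold functions
theorem pvFoldMinEq1 (l : List (Int × Int)) : ∀ (m : Int),
    l.foldl (fun m q => if q.1 < m then q.1 else m) m = l.foldl (fun m q => min m q.1) m := by
  induction l with
  | nil => intro m; rfl
  | cons p rest ih =>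
    intro m
    simp only [List.foldl_cons, ih]
    congr 1
    rcases lt_or_ge p.1 m with h | h
    · simp [h, min_eq_right (le_of_lt h)]
    · simp [not_lt.mpr h, min_eq_left h]

theorem pvFoldMinEq2 (l : List (Int × Int)) : ∀ (m : Int),
    l.foldl (fun m q => if q.2 < m then q.2 else m) m = l.foldl (fun m q => min m q.2) m := by
  induction l with
  | nil => intro m; rfl
  | cons p rest ih =>
    intro m
    simp only [List.foldl_cons, ih]
    congr 1
    rcases lt_or_ge p.2 m with h | h
    · simp [h, min_eq_right (le_of_lt h)]
    · simp [not_lt.mpr h, min_eq_left h]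

theorem pvFoldMin_le (f : Int × Int → Int) (l : List (Int × Int)) : ∀ (m : Int),
    l.foldl (fun m q => min m (f q)) m ≤ m := by
  induction l with
  | nil => intro m; simp
  | cons p rest ih =>
    intro m
    exact le_trans (ih (min m (f p))) (min_le_left _ _)

-- folding min over components shifted by -s
theorem pvFoldMin_shift1 (s : Int) (l : List (Int × Int)) : ∀ (m : Int),
    l.foldl (fun m p => min m (p.1 - s)) (m - s) =
      l.foldl (fun m p => min m p.1) m - s := by
  induction l with
  | nil => intro m; simp
  | cons p rest ih =>
    intro m
    simp only [List.foldl_cons]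
    have : min (m - s) (p.1 - s) = min m p.1 - s := by omega
    rw [this, ih]

theorem pvFoldMin_shift2 (s : Int) (l : List (Int × Int)) : ∀ (m : Int),
    l.foldl (fun m p => min m (p.2 - s)) (m - s) =
      l.foldl (fun m p => min m p.2) m - s := by
  induction l with
  | nil => intro m; simp
  | cons p rest ih =>
    intro m
    simp only [List.foldl_cons]
    have : min (m - s) (p.2 - s) = min m p.2 - s := by omega
    rw [this, ih]

theorem pvMinX_cons (p : Int × Int) (rest : List (Int × Int)) :
    pvMinX (p :: rest) = rest.foldl (fun m q => min m q.1) p.1 := rfl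

theorem pvMinY_cons (p : Int × Int) (rest : List (Int × Int)) :
    pvMinY (p :: rest) = rest.foldl (fun m q => min m q.2) p.2 := rfl

theorem codeToPoints_spec_aux (codes_list : List Int) :
    codeToPoints codes_list = codeToPoints_alt codes_list := by
  unfold codeToPoints codeToPoints_alt
  have hA := pvFoldA_eq codes_list [] 0 0 0 0
  simp only [List.nil_append] at hA
  simp only [hA, pvRevBuild, List.reverse_reverse]
  set ds := codes_list.map pvDelta with hds
  set Sx := (ds.map Prod.fst).sum with hSxdef
  set Sy := (ds.map Prod.snd).sum with hSydef
  set pts := pvAccum 0 0 ds with hpts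
  set mA1 := pts.tail.foldl (fun m q => min m q.1) 0 with hmA1
  set mA2 := pts.tail.foldl (fun m q => min m q.2) 0 with hmA2
  have hph : pts = (0, 0) :: pts.tail := by
    rw [hpts]; exact pvAccum_head ds 0 0
  have hshape : pts.map (fun p => (p.1 - Sx, p.2 - Sy)) =
      (0 - Sx, 0 - Sy) :: pts.tail.map (fun p => (p.1 - Sx, p.2 - Sy)) := by
    conv_lhs => rw [hph]
    simp
  -- B's minima are A's minima shifted by the total displacement
  have hBx : pvMinX (pts.map (fun p => (p.1 - Sx, p.2 - Sy))) = mA1 - Sx := by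
    rw [hshape, pvMinX_cons, List.foldl_map]
    simpa using pvFoldMin_shift1 Sx pts.tail 0
  have hBy : pvMinY (pts.map (fun p => (p.1 - Sx, p.2 - Sy))) = mA2 - Sy := by
    rw [hshape, pvMinY_cons, List.foldl_map]
    simpa using pvFoldMin_shift2 Sy pts.tail 0
  -- A's minima are nonpositive
  have hmxle : mA1 ≤ 0 := pvFoldMin_le Prod.fst _ 0
  have hmyle : mA2 ≤ 0 := pvFoldMin_le Prod.snd _ 0
  -- rewrite A's if-folds to min-folds
  simp only [pvFoldMinEq1, pvFoldMinEq2, ← hmA1, ← hmA2, hBx, hBy]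
  -- B's result as a single map over pts
  have hB : (pts.map (fun p => (p.1 - Sx, p.2 - Sy))).map
        (fun q => (q.1 - (mA1 - Sx), q.2 - (mA2 - Sy))) =
      pts.map (fun p => (p.1 - mA1, p.2 - mA2)) := by
    rw [List.map_map]
    apply List.map_congr_left
    intro q _
    simp only [Function.comp_apply, Prod.mk.injEq]
    constructor <;> ring
  rw [hB]
  by_cases h : mA1 < 0 ∨ mA2 < 0
  · simp only [h, if_pos]
    apply List.map_congr_left
    intro q _
    rw [abs_of_nonpos hmxle, abs_of_nonpos hmyle]
    simp [sub_eq_add_neg]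
  · simp only [h, if_neg, not_false_iff]
    have hno := not_or.mp h
    have h1 : mA1 = 0 := le_antisymm hmxle (not_lt.mp hno.1)
    have h2 : mA2 = 0 := le_antisymm hmyle (not_lt.mp hno.2)
    rw [h1, h2]
    conv_lhs => rw [← List.map_id pts]
    apply List.map_congr_left
    intro q _
    simp

-- ===== VERDICT (by name: the statement is the Claim_ definition above) =====
theorem codeToPoints_spec : Claim_equal_codeToPoints := by
  intro codes_list _ _
  unfold Spec_codeToPoints
  exact codeToPoints_spec_aux codes_list
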